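-- pv_equiv track=rewrite | github.com/ItsMeOX/Application1 | leetcode/completed/2280.py | minimumLines
-- ===== SOURCE A (Python) =====
-- from typing import List
--
-- def minimumLines(stockPrices: List[List[int]]) -> int:
--     if len(stockPrices) == 1:
--         return 0
--
--     stockPrices.sort()
--     res = 1
--
--     for i in range(2, len(stockPrices)):
--         x1, y1 = stockPrices[i-2]
--         x2, y2 = stockPrices[i-1]
--         x3, y3 = stockPrices[i]
--         if (y3-y2) * (x2-x1) != (y2-y1) * (x3-x2):
--             res += 1
--
--     return res
-- ===== SOURCE B (Python) =====
-- from typing import List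
--
-- # Like A, this sorts stockPrices in place; equivalence is about the return value.
-- # B greedily consumes one maximal collinear run per recursive call: an inner scan
-- # extends the current line as far as it goes, then B recurses on the remainder
-- # (which starts at the last point of the finished line).
--
-- def _collinear(p, q, r):
--     return (r[1] - q[1]) * (q[0] - p[0]) == (q[1] - p[1]) * (r[0] - q[0])
--
-- def _countLines(pts):
--     # pts: a sorted chain (length 0 or >= 2); counts one line per call
--     i = 2
--     while i < len(pts) and _collinear(pts[i - 2], pts[i - 1], pts[i]):
--         i += 1
--     if i >= len(pts):
--         return 1
--     return 1 + _countLines(pts[i - 1:])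
--
-- def minimumLines(stockPrices: List[List[int]]) -> int:
--     if len(stockPrices) == 1:
--         return 0
--     stockPrices.sort()
--     return _countLines(stockPrices)
-- ===== Notes on version B (the rewrite author's own statement) =====
-- stated objective: alternative
-- what changed: A runs one flat indexed loop over all triples incrementing a counter at each collinearity break; B instead greedily partitions the sorted chain into maximal collinear runs, one recursive call per line: an inner scan extends the current line as far as possible, then B recurses on the remaining suffix, so the answer is the number of recursive calls.
import Mathlib
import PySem

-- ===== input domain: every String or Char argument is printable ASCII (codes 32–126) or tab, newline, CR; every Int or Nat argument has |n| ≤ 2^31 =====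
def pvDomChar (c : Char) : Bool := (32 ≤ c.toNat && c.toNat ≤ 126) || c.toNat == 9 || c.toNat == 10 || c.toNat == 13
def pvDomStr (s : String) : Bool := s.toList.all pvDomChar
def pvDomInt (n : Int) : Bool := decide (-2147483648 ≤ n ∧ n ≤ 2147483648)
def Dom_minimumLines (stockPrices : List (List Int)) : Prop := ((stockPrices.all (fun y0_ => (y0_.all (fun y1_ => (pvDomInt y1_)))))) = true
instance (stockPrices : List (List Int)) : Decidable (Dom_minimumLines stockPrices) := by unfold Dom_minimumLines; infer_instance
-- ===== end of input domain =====

-- B replaces A's flat triple loop by a greedy recursion that consumes one maximal collinear run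
-- per call ('alternative' objective). Both Pythons sort stockPrices in place (same observable
-- mutation); the equivalence proved is about the return value.

-- ===== PORT A =====
-- loop body: 'x1, y1 = stockPrices[i-2]' etc. read as indexed access; Pre_ guarantees rows of
-- length 2 whenever the loop runs, so the pyGetD defaults never fire.
def pvCrossStep (sp : List (List Int)) (res : Int) (i : Int) : Int :=
  let p1 := PySem.List.pyGetD sp (i - 2) []
  let p2 := PySem.List.pyGetD sp (i - 1) []
  let p3 := PySem.List.pyGetD sp i []
  let x1 := PySem.List.pyGetD p1 0 0
  let y1 := PySem.List.pyGetD p1 1 0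
  let x2 := PySem.List.pyGetD p2 0 0
  let y2 := PySem.List.pyGetD p2 1 0
  let x3 := PySem.List.pyGetD p3 0 0
  let y3 := PySem.List.pyGetD p3 1 0
  if (y3 - y2) * (x2 - x1) ≠ (y2 - y1) * (x3 - x2) then res + 1 else res

def minimumLines (stockPrices : List (List Int)) : Int :=
  if stockPrices.length = 1 then 0
  else
    -- stockPrices.sort() : Python's lexicographic list order
    let sp := PySem.List.sorted stockPrices (fun x => x) false
    (PySem.List.pyRange 2 (sp.length : Int) 1).foldl (pvCrossStep sp) 1

-- ===== PORT B =====
-- Source B _collinear(p, q, r)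
def pvCollinear (p q r : List Int) : Bool :=
  (PySem.List.pyGetD r 1 0 - PySem.List.pyGetD q 1 0) * (PySem.List.pyGetD q 0 0 - PySem.List.pyGetD p 0 0)
    == (PySem.List.pyGetD q 1 0 - PySem.List.pyGetD p 1 0) * (PySem.List.pyGetD r 0 0 - PySem.List.pyGetD q 0 0)

-- the inner 'while i < len(pts) and _collinear(...)' loop of Source B's _countLines;
-- the fuel argument only bounds the number of iterations (the loop advances i once per step
-- and stops at i = len(pts), so any fuel ≥ len(pts) - i is exact)
def pvRunEnd (pts : List (List Int)) : Nat → Nat → Nat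
  | i, 0 => i
  | i, k + 1 =>
    if i < pts.length ∧ pvCollinear (PySem.List.pyGetD pts ((i : Int) - 2) [])
        (PySem.List.pyGetD pts ((i : Int) - 1) []) (PySem.List.pyGetD pts (i : Int) []) = true
    then pvRunEnd pts (i + 1) k else i

-- Source B _countLines; the fuel bounds the recursion depth (each call consumes at least one point
-- of the chain, so any fuel ≥ len(pts) is exact)
def pvCountLines : Nat → List (List Int) → Int
  | 0, _ => 1
  | k + 1, pts =>
    let i := pvRunEnd pts 2 pts.length
    if pts.length ≤ i then 1
    else 1 + pvCountLines k (PySem.List.slice pts (some ((i : Int) - 1)) none)   -- pts[i-1:]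

def minimumLines_alt (stockPrices : List (List Int)) : Int :=
  if stockPrices.length = 1 then 0
  else
    let sp := PySem.List.sorted stockPrices (fun x => x) false
    pvCountLines sp.length sp

-- ===== PRECONDITION & SPEC =====
-- Pre_ excludes exactly the inputs on which A raises: length ≥ 3 with some row not a 2-element
-- list, where A's 'x1, y1 = …' unpacking raises ValueError (for length ≤ 2 no row is touched).
def Pre_minimumLines (stockPrices : List (List Int)) : Prop :=
  stockPrices.length ≤ 2 ∨ ∀ p ∈ stockPrices, p.length = 2
instance (stockPrices : List (List Int)) : Decidable (Pre_minimumLines stockPrices) := by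
  unfold Pre_minimumLines; infer_instance

def pvWitness_minimumLines : List (List Int) := [[1, 2], [3, 4], [2, 3]]

def Spec_minimumLines (stockPrices : List (List Int)) (out : Int) : Prop := out = minimumLines_alt stockPrices
instance (stockPrices : List (List Int)) (out : Int) : Decidable (Spec_minimumLines stockPrices out) := by unfold Spec_minimumLines; infer_instance

-- ===== CLAIM (what is proved, stated in full; the proofs are below) =====
def Claim_equal_minimumLines : Prop := ∀ (stockPrices : List (List Int)), Dom_minimumLines stockPrices → Pre_minimumLines stockPrices → Spec_minimumLines stockPrices (minimumLines stockPrices)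

-- ===== LEMMAS AND PROOFS =====

-- the collinearity test at triple index i, as both loop bodies evaluate it
def pvColAt (pts : List (List Int)) (i : Nat) : Bool :=
  pvCollinear (PySem.List.pyGetD pts ((i : Int) - 2) [])
    (PySem.List.pyGetD pts ((i : Int) - 1) []) (PySem.List.pyGetD pts (i : Int) [])

-- number of collinearity breaks at triple indices ≥ i
def pvCntFrom (pts : List (List Int)) (i : Nat) : Int :=
  if i < pts.length then (if pvColAt pts i then 0 else 1) + pvCntFrom pts (i + 1) else 0
termination_by pts.length - i

theorem pvCntFrom_stop (pts : List (List Int)) (i : Nat) (h : pts.length ≤ i) :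
    pvCntFrom pts i = 0 := by
  rw [pvCntFrom, if_neg (by omega)]

-- ---- A's indexed loop counts the breaks ----
theorem pvA_loop (sp : List (List Int)) (i : Nat) (res : Int) :
    (PySem.List.pyRange (i : Int) (sp.length : Int) 1).foldl (pvCrossStep sp) res
      = res + pvCntFrom sp i := by
  by_cases h : i < sp.length
  · rw [PySem.List.pyRange_one_cons (by exact_mod_cast h), List.foldl_cons]
    have hstep : pvCrossStep sp res (i : Int) = res + (if pvColAt sp i then 0 else 1) := by
      simp only [pvCrossStep, pvColAt, pvCollinear, beq_iff_eq]
      split_ifs <;> simp_all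
    rw [hstep, show ((i : Int) + 1) = ((i + 1 : Nat) : Int) by push_cast; ring,
        pvA_loop sp (i + 1) (res + (if pvColAt sp i then 0 else 1))]
    conv_rhs => rw [pvCntFrom, if_pos h]
    ring
  · rw [PySem.List.pyRange_one_eq_nil (by exact_mod_cast Nat.le_of_not_lt h),
        pvCntFrom_stop sp i (Nat.le_of_not_lt h)]
    simp
termination_by sp.length - i

-- ---- properties of B's inner while loop ----
theorem pvRunEnd_ge (pts : List (List Int)) :
    ∀ (k i : Nat), i ≤ pvRunEnd pts i k := by
  intro k
  induction k with
  | zero => intro i; exact le_refl i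
  | succ k ih =>
    intro i
    rw [pvRunEnd]
    split
    · have := ih (i + 1); omega
    · exact le_refl i

theorem pvRunEnd_zeros (pts : List (List Int)) :
    ∀ (k i j : Nat), i ≤ j → j < pvRunEnd pts i k → j < pts.length ∧ pvColAt pts j = true := by
  intro k
  induction k with
  | zero => intro i j hij hjr; rw [pvRunEnd] at hjr; omega
  | succ k ih =>
    intro i j hij hjr
    rw [pvRunEnd] at hjr
    split at hjr
    · rcases Nat.eq_or_lt_of_le hij with rfl | hlt
      · rename_i h; exact ⟨h.1, h.2⟩
      · exact ih (i + 1) j hlt hjr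
    · omega

theorem pvRunEnd_stop (pts : List (List Int)) :
    ∀ (k i : Nat), pts.length ≤ i + k → pvRunEnd pts i k < pts.length →
      pvColAt pts (pvRunEnd pts i k) = false := by
  intro k
  induction k with
  | zero => intro i hk hlt; rw [pvRunEnd] at hlt ⊢; omega
  | succ k ih =>
    intro i hk hlt
    rw [pvRunEnd] at hlt ⊢
    split at hlt
    · rename_i h
      rw [if_pos h]
      exact ih (i + 1) (by omega) hlt
    · rename_i h
      rw [if_neg h]
      rcases Bool.eq_false_or_eq_true (pvColAt pts i) with ht | hf
      · exact absurd ⟨hlt, ht⟩ h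
      · exact hf

-- ---- pvCntFrom is constant across an all-collinear stretch ----
theorem pvCntFrom_zeros (pts : List (List Int)) :
    ∀ (k i : Nat), (∀ j, i ≤ j → j < i + k → pvColAt pts j = true) →
      pvCntFrom pts i = pvCntFrom pts (i + k) := by
  intro k
  induction k with
  | zero => intro i _; rfl
  | succ k ih =>
    intro i hz
    by_cases h : i < pts.length
    · rw [pvCntFrom, if_pos h, hz i (le_refl i) (by omega)]
      rw [show i + (k + 1) = (i + 1) + k by omega,
          ← ih (i + 1) (fun j h1 h2 => hz j (by omega) (by omega))]
      simp
    · rw [pvCntFrom_stop pts i (by omega), pvCntFrom_stop pts (i + (k + 1)) (by omega)]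

-- ---- indexing and counting shift under List.drop ----
theorem pvGetD_drop (pts : List (List Int)) (d m : Nat) :
    (pts.drop d).getD m [] = pts.getD (d + m) [] := by
  simp [List.getD_eq_getElem?_getD, List.getElem?_drop]

theorem pvColAt_drop (pts : List (List Int)) (d j : Nat) (hj : 2 ≤ j) :
    pvColAt (pts.drop d) j = pvColAt pts (j + d) := by
  have e2 : ((j : Int) - 2) = ((j - 2 : Nat) : Int) := by omega
  have e1 : ((j : Int) - 1) = ((j - 1 : Nat) : Int) := by omega
  have f2 : (((j + d : Nat) : Int) - 2) = ((j + d - 2 : Nat) : Int) := by omega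
  have f1 : (((j + d : Nat) : Int) - 1) = ((j + d - 1 : Nat) : Int) := by omega
  simp only [pvColAt, e2, e1, f2, f1, PySem.List.pyGetD_natCast, pvGetD_drop]
  rw [show d + (j - 2) = j + d - 2 by omega, show d + (j - 1) = j + d - 1 by omega,
      show d + j = j + d by omega]

theorem pvCntFrom_drop (pts : List (List Int)) (d : Nat) (j : Nat) (hj : 2 ≤ j) :
    pvCntFrom (pts.drop d) j = pvCntFrom pts (j + d) := by
  by_cases h : j < (pts.drop d).length
  · have hlen : (pts.drop d).length = pts.length - d := List.length_drop
    rw [pvCntFrom, if_pos h, pvColAt_drop pts d j hj,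
        pvCntFrom_drop pts d (j + 1) (by omega)]
    rw [show (j + 1) + d = (j + d) + 1 by omega]
    conv_rhs => rw [pvCntFrom, if_pos (by omega)]
  · have hlen : (pts.drop d).length = pts.length - d := List.length_drop
    rw [pvCntFrom_stop _ j (by omega), pvCntFrom_stop pts (j + d) (by omega)]
termination_by pts.length - j
decreasing_by simp only [List.length_drop] at h; omega

-- ---- B's greedy per-line recursion counts 1 + the breaks from index 2 ----
theorem pvCountLines_eq :
    ∀ (k : Nat) (pts : List (List Int)), pts.length ≤ k →
      pvCountLines k pts = 1 + pvCntFrom pts 2 := by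
  intro k
  induction k with
  | zero =>
    intro pts hk
    rw [pvCountLines, pvCntFrom_stop pts 2 (by omega)]
    norm_num
  | succ k ih =>
    intro pts hk
    rw [pvCountLines]
    have h2 : 2 ≤ pvRunEnd pts 2 pts.length := pvRunEnd_ge pts pts.length 2
    have hz : ∀ j, 2 ≤ j → j < 2 + (pvRunEnd pts 2 pts.length - 2) → pvColAt pts j = true := by
      intro j hj hlt
      exact (pvRunEnd_zeros pts pts.length 2 j hj (by omega)).2
    by_cases h : pts.length ≤ pvRunEnd pts 2 pts.length
    · rw [if_pos h]
      rw [pvCntFrom_zeros pts (pvRunEnd pts 2 pts.length - 2) 2 hz,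
          pvCntFrom_stop pts (2 + (pvRunEnd pts 2 pts.length - 2)) (by omega)]
      norm_num
    · rw [if_neg h]
      rw [show ((pvRunEnd pts 2 pts.length : Int) - 1)
            = ((pvRunEnd pts 2 pts.length - 1 : Nat) : Int) by omega,
          PySem.List.slice_from_natCast,
          ih (pts.drop (pvRunEnd pts 2 pts.length - 1)) (by simp only [List.length_drop]; omega),
          pvCntFrom_drop pts (pvRunEnd pts 2 pts.length - 1) 2 (le_refl 2)]
      conv_rhs => rw [pvCntFrom_zeros pts (pvRunEnd pts 2 pts.length - 2) 2 hz]
      have hE : 2 + (pvRunEnd pts 2 pts.length - 2) = pvRunEnd pts 2 pts.length := by omega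
      rw [hE]
      conv_rhs => rw [pvCntFrom, if_pos (by omega),
        pvRunEnd_stop pts pts.length 2 (by omega) (by omega)]
      rw [show 2 + (pvRunEnd pts 2 pts.length - 1) = pvRunEnd pts 2 pts.length + 1 by omega]
      simp

-- ===== VERDICT (by name: the statement is the Claim_ definition above) =====
theorem minimumLines_spec : Claim_equal_minimumLines := by
  intro sp _ _
  unfold Spec_minimumLines minimumLines minimumLines_alt
  by_cases h : sp.length = 1
  · rw [if_pos h, if_pos h]
  · rw [if_neg h, if_neg h]
    simp only []
    rw [pvCountLines_eq (PySem.List.sorted sp (fun x => x) false).length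
          (PySem.List.sorted sp (fun x => x) false) (le_refl _),
        show (2 : Int) = ((2 : Nat) : Int) by norm_num,
        pvA_loop (PySem.List.sorted sp (fun x => x) false) 2 1]
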